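-- pv_equiv track=rewrite | github.com/mathiasbyskov/Thesis | onelayer_nn.py | kmerifyX
-- ===== SOURCE A (Python) =====
-- def kmerifyX(onehotX, win_size):
--     """
--     Creates the Kmers from the onehot-encoding and a window-size.
--
--     Input:
--         onehotX: One-hot encoding of features with shape(K x N x Len(Alphabet))
--         win_size: Size of the sliding window
--
--     Output:
--         KmersX: The Kmers of the features shape(sum(len(K)) x win_size x len(Alphabet))
--
--     """
--
--     middle = int(win_size / 2)
--
--     kmersX = []
--     zero_vec = [0 for i in range(len(onehotX[0][0]))]
--
--     for i in range(len(onehotX)):        # Number of seqs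
--         for j in range(len(onehotX[i])): # Number of AA's in seq
--             kmer = []
--
--             for counter in range(win_size):
--
--                 if (j - middle + counter) < 0 or (j - middle + counter) > (len(onehotX[i]) - 1):
--                     kmer.append(zero_vec)
--                 else:
--                     kmer.append(onehotX[i][j - middle + counter])
--
--             kmersX.append(kmer)
--
--     return kmersX
-- ===== SOURCE B (Python) =====
-- def kmerifyX(onehotX, win_size):
--     middle = int(win_size / 2)
--     zero_vec = [0] * len(onehotX[0][0])
--     kmersX = []
--     for seq in onehotX:
--         padded = [zero_vec] * middle + list(seq) + [zero_vec] * (win_size - 1 - middle)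
--         for j in range(len(seq)):
--             kmersX.append([padded[j + c] for c in range(win_size)])
--     return kmersX
-- ===== Notes on version B (the rewrite author's own statement) =====
-- stated objective: simpler
-- what changed: Instead of testing bounds and branching for every window cell, B pads each sequence once with zero vectors on both sides and gathers each window directly from the padded list, eliminating the per-cell bounds check.
import Mathlib
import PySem

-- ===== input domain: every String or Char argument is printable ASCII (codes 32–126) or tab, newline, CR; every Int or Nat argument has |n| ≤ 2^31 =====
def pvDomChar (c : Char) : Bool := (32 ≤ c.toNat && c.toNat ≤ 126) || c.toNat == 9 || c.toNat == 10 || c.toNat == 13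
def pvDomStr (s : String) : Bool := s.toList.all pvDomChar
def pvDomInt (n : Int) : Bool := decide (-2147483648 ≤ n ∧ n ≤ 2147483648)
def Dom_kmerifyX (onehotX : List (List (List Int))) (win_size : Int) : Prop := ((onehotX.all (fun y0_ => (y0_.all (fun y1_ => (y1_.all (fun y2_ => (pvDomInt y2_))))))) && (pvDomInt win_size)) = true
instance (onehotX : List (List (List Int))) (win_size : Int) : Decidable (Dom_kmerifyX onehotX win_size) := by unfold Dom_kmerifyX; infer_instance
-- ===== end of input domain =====

-- B replaces A's per-element bounds-check branch by padding each sequence with zero vectors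
-- once and gathering each window from the padded list (objective: simpler decomposition).


-- ===== PORT A =====
-- literal port of A; middle = int(win_size / 2) truncates toward zero (Int.tdiv; exact
-- since |win_size| ≤ 2^31 makes the float division exact); onehotX[0][0], which raises
-- IndexError when absent, is transliterated totally with pyGetD and guarded by Pre_.
def kmerifyX (onehotX : List (List (List Int))) (win_size : Int) : List (List (List Int)) :=
  let middle : Int := Int.tdiv win_size 2
  let zero_vec : List Int :=
    (List.range (PySem.List.pyGetD (PySem.List.pyGetD onehotX 0 []) 0 []).length).map (fun _ => (0 : Int))
  (PySem.List.pyRange 0 (onehotX.length : Int)).foldl (fun kmersX i =>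
    let seq := PySem.List.pyGetD onehotX i []
    (PySem.List.pyRange 0 (seq.length : Int)).foldl (fun kmersX j =>
      let kmer := (PySem.List.pyRange 0 win_size).foldl (fun kmer counter =>
        if (j - middle + counter) < 0 ∨ (j - middle + counter) > ((seq.length : Int) - 1) then
          kmer ++ [zero_vec]
        else
          kmer ++ [PySem.List.pyGetD seq (j - middle + counter) []]) []
      kmersX ++ [kmer]) kmersX) []

-- ===== PORT B =====
-- literal port of Source B; [v] * n for possibly negative n is List.replicate n.toNat v
-- (Python list repetition yields [] for n ≤ 0); padded[j + c] is always in range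
-- whenever range(win_size) is nonempty, so pyGetD with default [] is exact there.
def kmerifyX_alt (onehotX : List (List (List Int))) (win_size : Int) : List (List (List Int)) :=
  let middle : Int := Int.tdiv win_size 2
  let zero_vec : List Int :=
    List.replicate (PySem.List.pyGetD (PySem.List.pyGetD onehotX 0 []) 0 []).length 0
  onehotX.foldl (fun kmersX seq =>
    let padded := List.replicate middle.toNat zero_vec ++ seq
        ++ List.replicate (win_size - 1 - middle).toNat zero_vec
    (PySem.List.pyRange 0 (seq.length : Int)).foldl (fun kmersX j =>
      kmersX ++ [(PySem.List.pyRange 0 win_size).map (fun c => PySem.List.pyGetD padded (j + c) [])])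
      kmersX) []

-- ===== PRECONDITION & SPEC =====
-- Pre_ excludes exactly the inputs where Python A raises IndexError on onehotX[0][0]:
-- onehotX empty, or its first sequence empty.
def Pre_kmerifyX (onehotX : List (List (List Int))) (win_size : Int) : Prop :=
  onehotX ≠ [] ∧ onehotX.headD [] ≠ []
instance (onehotX : List (List (List Int))) (win_size : Int) : Decidable (Pre_kmerifyX onehotX win_size) := by unfold Pre_kmerifyX; infer_instance
def pvWitness_kmerifyX : List (List (List Int)) × Int := ([[[1, 0], [0, 1]], [[1, 1]]], 3)

def Spec_kmerifyX (onehotX : List (List (List Int))) (win_size : Int) (out : List (List (List Int))) : Prop := out = kmerifyX_alt onehotX win_size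
instance (onehotX : List (List (List Int))) (win_size : Int) (out : List (List (List Int))) : Decidable (Spec_kmerifyX onehotX win_size out) := by unfold Spec_kmerifyX; infer_instance

-- ===== CLAIM (what is proved, stated in full; the proofs are below) =====
def Claim_equal_kmerifyX : Prop := ∀ (onehotX : List (List (List Int))) (win_size : Int), Dom_kmerifyX onehotX win_size → Pre_kmerifyX onehotX win_size → Spec_kmerifyX onehotX win_size (kmerifyX onehotX win_size)

-- ===== LEMMAS AND PROOFS =====

-- One window entry: A's bounds-checked choice equals B's lookup in the padded sequence.
theorem kmer_entry_eq (seq : List (List Int)) (win_size middle : Int) (z : List Int)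
    (hm : middle = Int.tdiv win_size 2) (j : Int) (hj0 : 0 ≤ j) (hj : j < (seq.length : Int))
    (c : Int) (hc0 : 0 ≤ c) (hcw : c < win_size) :
    (if (j - middle + c) < 0 ∨ (j - middle + c) > ((seq.length : Int) - 1)
       then z else PySem.List.pyGetD seq (j - middle + c) [])
    = PySem.List.pyGetD (List.replicate middle.toNat z ++ seq
        ++ List.replicate (win_size - 1 - middle).toNat z) (j + c) [] := by
  have hw1 : 1 ≤ win_size := by omega
  have hme : middle = win_size / 2 := by rw [hm, Int.tdiv_eq_ediv_of_nonneg (by omega)]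
  have hm0 : 0 ≤ middle := by omega
  have hmle : middle ≤ win_size - 1 := by omega
  have hiN : (((j + c).toNat : Int)) = j + c := Int.toNat_of_nonneg (by omega)
  rw [List.append_assoc]
  rw [show j + c = (((j + c).toNat : Nat) : Int) from hiN.symm, PySem.List.pyGetD_natCast]
  by_cases h1 : j - middle + c < 0
  · rw [if_pos (Or.inl h1)]
    rw [List.getD_append _ _ _ ((j + c).toNat) (by simp only [List.length_replicate]; omega)]
    refine (List.getD_replicate z ?_).symm
    omega
  · by_cases h2 : j - middle + c > ((seq.length : Int)) - 1
    · rw [if_pos (Or.inr h2)]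
      rw [List.getD_append_right _ _ _ ((j + c).toNat) (by simp only [List.length_replicate]; omega)]
      simp only [List.length_replicate]
      rw [List.getD_append_right _ _ _ ((j + c).toNat - middle.toNat) (by omega)]
      refine (List.getD_replicate z ?_).symm
      omega
    · rw [if_neg (by omega)]
      rw [List.getD_append_right _ _ _ ((j + c).toNat) (by simp only [List.length_replicate]; omega)]
      simp only [List.length_replicate]
      rw [List.getD_append _ _ _ ((j + c).toNat - middle.toNat) (by omega)]
      have h3 : j - middle + c = (((j + c).toNat - middle.toNat : Nat) : Int) := by omega
      rw [h3, PySem.List.pyGetD_natCast]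

-- The whole window at position j: A's counter fold equals B's map over the padded list.
theorem kmer_eq (seq : List (List Int)) (win_size middle : Int) (z : List Int)
    (hm : middle = Int.tdiv win_size 2) (j : Int) (hj0 : 0 ≤ j) (hj : j < (seq.length : Int)) :
    (PySem.List.pyRange 0 win_size).foldl (fun kmer counter =>
        if (j - middle + counter) < 0 ∨ (j - middle + counter) > ((seq.length : Int) - 1) then
          kmer ++ [z]
        else
          kmer ++ [PySem.List.pyGetD seq (j - middle + counter) []]) []
    = (PySem.List.pyRange 0 win_size).map (fun c =>
        PySem.List.pyGetD (List.replicate middle.toNat z ++ seq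
          ++ List.replicate (win_size - 1 - middle).toNat z) (j + c) []) := by
  have h1 : (PySem.List.pyRange 0 win_size).foldl (fun kmer counter =>
        if (j - middle + counter) < 0 ∨ (j - middle + counter) > ((seq.length : Int) - 1) then
          kmer ++ [z]
        else
          kmer ++ [PySem.List.pyGetD seq (j - middle + counter) []]) []
      = (PySem.List.pyRange 0 win_size).foldl (fun kmer counter =>
          kmer ++ [if (j - middle + counter) < 0 ∨ (j - middle + counter) > ((seq.length : Int) - 1)
            then z else PySem.List.pyGetD seq (j - middle + counter) []]) [] := by
    apply PySem.List.foldl_congr_mem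
    intro acc c _
    split_ifs <;> rfl
  rw [h1, PySem.List.foldl_append_singleton_eq_map, List.nil_append]
  apply List.map_congr_left
  intro c hc
  rw [PySem.List.mem_pyRange_one] at hc
  exact kmer_entry_eq seq win_size middle z hm j hj0 hj c hc.1 hc.2

-- ===== VERDICT (by name: the statement is the Claim_ definition above) =====
theorem kmerifyX_spec : Claim_equal_kmerifyX := by
  intro onehotX win_size _ _
  unfold Spec_kmerifyX
  simp only [kmerifyX, kmerifyX_alt, List.map_const', List.length_range]
  rw [PySem.List.foldl_pyRange_zero_pyGetD' onehotX []
      (fun kmersX seq =>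
        (PySem.List.pyRange 0 (seq.length : Int)).foldl (fun kmersX j =>
          kmersX ++ [(PySem.List.pyRange 0 win_size).foldl (fun kmer counter =>
            if (j - Int.tdiv win_size 2 + counter) < 0 ∨
                (j - Int.tdiv win_size 2 + counter) > ((seq.length : Int) - 1) then
              kmer ++ [List.replicate (PySem.List.pyGetD (PySem.List.pyGetD onehotX 0 []) 0 []).length (0 : Int)]
            else
              kmer ++ [PySem.List.pyGetD seq (j - Int.tdiv win_size 2 + counter) []]) []]) kmersX) []]
  apply PySem.List.foldl_congr_mem
  intro acc seq _
  apply PySem.List.foldl_congr_mem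
  intro acc2 j hj
  rw [PySem.List.mem_pyRange_one] at hj
  exact congrArg (fun k => acc2 ++ [k]) (kmer_eq seq win_size _ _ rfl j hj.1 hj.2)
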